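-- pv_equiv track=rewrite | github.com/ZYX200108/ICS33-Python | q4helper/q4solution.py | min_key_order
-- ===== SOURCE A (Python) =====
-- def min_key_order(adict):
--     # smallest = None
--     # x = 0
--     # while True:
--     #     secondSmallest = None
--     #     for keys, values in adict.items():
--     #         if x == 0:
--     #             smallest = keys
--     #             x += 1
--     #         elif secondSmallest == None:
--     #             if mallest > keys:
--     #                 smallest = keys
--     smallestKey = None
--     x = 0
--     while True:
--         b = False
--         for k,v in sorted(adict.items()):
--             if x == 0:
--                 smallestKey = k
--                 x += 1
--                 b = True
--                 yield (k,v)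
--                 break
--             else:
--                 if k > smallestKey:
--                     smallestKey = k
--                     b = True
--                     yield (k,v)
--                     break
--         if b == False:
--             break
-- ===== SOURCE B (Python) =====
-- def min_key_order(adict):
--     # One sort, yielded directly, instead of re-sorting and scanning for the
--     # successor key on every iteration.
--     yield from sorted(adict.items())
-- ===== Notes on version B (the rewrite author's own statement) =====
-- stated objective: faster
-- what changed: B sorts the items once and yields them directly, instead of A's loop that re-sorts the dict and linearly scans for the next key greater than the last yielded one on every single yield.
import Mathlib
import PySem

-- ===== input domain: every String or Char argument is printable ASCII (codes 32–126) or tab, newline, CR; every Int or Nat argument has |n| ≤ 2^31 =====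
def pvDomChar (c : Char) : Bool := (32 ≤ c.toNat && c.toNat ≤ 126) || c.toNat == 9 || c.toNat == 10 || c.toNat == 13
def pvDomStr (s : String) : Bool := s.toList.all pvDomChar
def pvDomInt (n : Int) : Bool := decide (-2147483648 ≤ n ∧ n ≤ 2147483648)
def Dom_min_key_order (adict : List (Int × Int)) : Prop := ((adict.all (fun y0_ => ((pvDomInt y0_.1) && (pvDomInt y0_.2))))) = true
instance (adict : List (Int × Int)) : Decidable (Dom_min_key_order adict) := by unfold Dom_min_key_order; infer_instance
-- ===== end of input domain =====

-- B replaces A's re-sort-and-scan-per-yield loop with a single sort yielded directly (generators; both are compared by the list of yielded items).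

-- ===== PORT A =====
-- A's per-iteration `sorted(adict.items())` (Python sorts the (k,v) tuples lexicographically)
def pvSortedItems (adict : List (Int × Int)) : List (Int × Int) :=
  PySem.List.sorted2 adict Prod.fst Prod.snd false

-- the inner `for` of A after the first yield: scan sorted(adict.items()) for the
-- first pair whose key exceeds smallestKey (A breaks as soon as it yields)
def pvFindNext (s : List (Int × Int)) (sk : Int) : Option (Int × Int) :=
  match s with
  | [] => none
  | (k, v) :: t => if sk < k then some (k, v) else pvFindNext t sk

-- A's `while True` after the first iteration; the loop yields at most one item per
-- pass and stops when no key exceeds smallestKey, so `fuel` = |adict| passes suffice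
def pvWhileA (adict : List (Int × Int)) (sk : Int) (fuel : Nat) : List (Int × Int) :=
  match fuel with
  | 0 => []
  | fuel + 1 =>
    match pvFindNext (pvSortedItems adict) sk with
    | none => []
    | some (k, v) => (k, v) :: pvWhileA adict k fuel

def min_key_order (adict : List (Int × Int)) : List (Int × Int) :=
  -- first pass (x == 0): yield the head of sorted(adict.items()), then loop
  match pvSortedItems adict with
  | [] => []
  | (k, v) :: _ => (k, v) :: pvWhileA adict k adict.length

-- ===== PORT B =====
def min_key_order_alt (adict : List (Int × Int)) : List (Int × Int) :=
  PySem.List.sorted2 adict Prod.fst Prod.snd false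

-- ===== PRECONDITION & SPEC =====
-- Pre_ is the dict representation invariant only: adict stands for a Python dict,
-- whose keys are necessarily distinct, so it excludes no input the Python accepts.
def Pre_min_key_order (adict : List (Int × Int)) : Prop := (adict.map Prod.fst).Nodup
instance (adict : List (Int × Int)) : Decidable (Pre_min_key_order adict) := by unfold Pre_min_key_order; infer_instance
def pvWitness_min_key_order : (List (Int × Int)) := [(2, 5), (-1, 3), (0, 0)]

def Spec_min_key_order (adict : List (Int × Int)) (out : List (Int × Int)) : Prop := out = min_key_order_alt adict
instance (adict : List (Int × Int)) (out : List (Int × Int)) : Decidable (Spec_min_key_order adict out) := by unfold Spec_min_key_order; infer_instance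

-- ===== CLAIM (what is proved, stated in full; the proofs are below) =====
def Claim_equal_min_key_order : Prop := ∀ (adict : List (Int × Int)), Dom_min_key_order adict → Pre_min_key_order adict → Spec_min_key_order adict (min_key_order adict)

-- ===== LEMMAS AND PROOFS =====

-- the strict-weak-order comparison sorted2 uses (Python's tuple `<` on (fst, snd))
def pvBlex (a b : Int × Int) : Bool :=
  decide (a.1 < b.1) || (!decide (b.1 < a.1) && decide (a.2 < b.2))

theorem pvBlex_trans {a b c : Int × Int} (h1 : pvBlex a b = true) (h2 : pvBlex b c = true) :
    pvBlex a c = true := by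
  simp only [pvBlex, Bool.or_eq_true, Bool.and_eq_true, Bool.not_eq_eq_eq_not, Bool.not_true,
    decide_eq_true_eq, decide_eq_false_iff_not] at *
  omega

theorem pvBlex_asymm {a b : Int × Int} (h : pvBlex a b = true) : pvBlex b a = false := by
  by_contra hb
  rw [Bool.not_eq_false] at hb
  have := pvBlex_trans h hb
  simp [pvBlex] at this

theorem pairwise_insertBy (x : Int × Int) (acc : List (Int × Int))
    (h : acc.Pairwise (fun a b => pvBlex b a = false)) :
    (PySem.List.insertBy pvBlex x acc).Pairwise (fun a b => pvBlex b a = false) := by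
  induction acc with
  | nil => simp [PySem.List.insertBy]
  | cons y t ih =>
    rw [List.pairwise_cons] at h
    obtain ⟨hy, ht⟩ := h
    by_cases hxy : pvBlex x y = true
    · simp only [PySem.List.insertBy, hxy, if_pos]
      refine List.Pairwise.cons ?_ (List.Pairwise.cons hy ht)
      intro z hz
      rcases List.mem_cons.mp hz with rfl | hzt
      · exact pvBlex_asymm hxy
      · cases hb : pvBlex z x with
        | false => rfl
        | true => exact absurd (pvBlex_trans hb hxy) (by simp [hy z hzt])
    · have hxy' : pvBlex x y = false := by simpa using hxy
      simp only [PySem.List.insertBy, hxy', Bool.false_eq_true, if_neg, not_false_iff]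
      refine List.Pairwise.cons ?_ (ih ht)
      intro z hz
      rcases (PySem.List.mem_insertBy pvBlex x z t).mp hz with hz | hz
      · subst hz; exact hxy'
      · exact hy z hz
  
theorem pairwise_sorted2_foldl (xs acc : List (Int × Int))
    (h : acc.Pairwise (fun a b => pvBlex b a = false)) :
    (xs.foldl (fun acc x => PySem.List.insertBy pvBlex x acc) acc).Pairwise
      (fun a b => pvBlex b a = false) := by
  induction xs generalizing acc with
  | nil => simpa using h
  | cons x t ih => exact ih _ (pairwise_insertBy x acc h)

theorem sorted2_pairwise_blex (adict : List (Int × Int)) :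
    (PySem.List.sorted2 adict Prod.fst Prod.snd false).Pairwise
      (fun a b => pvBlex b a = false) := by
  have : PySem.List.sorted2 adict Prod.fst Prod.snd false
      = adict.foldl (fun acc x => PySem.List.insertBy pvBlex x acc) [] := rfl
  rw [this]
  exact pairwise_sorted2_foldl adict [] (by simp)

-- with distinct keys, sorted2's order is strictly key-increasing
theorem sorted2_pairwise_keys_lt (adict : List (Int × Int))
    (hnd : (adict.map Prod.fst).Nodup) :
    (PySem.List.sorted2 adict Prod.fst Prod.snd false).Pairwise
      (fun a b => a.1 < b.1) := by
  have hperm : (PySem.List.sorted2 adict Prod.fst Prod.snd false).Perm adict :=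
    PySem.List.sorted2_perm adict Prod.fst Prod.snd false
  have hnd' : ((PySem.List.sorted2 adict Prod.fst Prod.snd false).map Prod.fst).Nodup :=
    ((hperm.map Prod.fst).nodup_iff).mpr hnd
  rw [List.nodup_iff_pairwise_ne, List.pairwise_map] at hnd'
  have hblex := sorted2_pairwise_blex adict
  refine (hnd'.and hblex).imp ?_
  rintro a b ⟨hne, hb⟩
  simp only [pvBlex, Bool.or_eq_false_iff, Bool.and_eq_false_iff, decide_eq_false_iff_not] at hb
  rcases lt_trichotomy a.1 b.1 with h | h | h
  · exact h
  · exact absurd h hne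
  · exact absurd h hb.1

theorem pvFindNext_append (p t : List (Int × Int)) (sk : Int)
    (hp : ∀ a ∈ p, ¬ sk < a.1) : pvFindNext (p ++ t) sk = pvFindNext t sk := by
  induction p with
  | nil => rfl
  | cons a p ih =>
    obtain ⟨k, v⟩ := a
    have : ¬ sk < k := hp (k, v) (by simp)
    simp only [List.cons_append, pvFindNext, if_neg this]
    exact ih (fun a ha => hp a (by simp [ha]))

-- the while loop, entered with smallestKey = sk and p already yielded, yields
-- exactly the remaining suffix t of the sorted items
theorem pvWhileA_suffix (adict : List (Int × Int)) :
    ∀ (t p : List (Int × Int)) (sk : Int) (fuel : Nat),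
    pvSortedItems adict = p ++ t →
    (∀ a ∈ p, a.1 ≤ sk) → (∀ a ∈ t, sk < a.1) →
    t.Pairwise (fun a b => a.1 < b.1) → t.length ≤ fuel →
    pvWhileA adict sk fuel = t := by
  intro t
  induction t with
  | nil =>
    intro p sk fuel hs hp _ _ _
    match fuel with
    | 0 => rfl
    | fuel + 1 =>
      simp only [pvWhileA, hs]
      rw [pvFindNext_append p [] sk (fun a ha => not_lt.mpr (hp a ha))]
      rfl
  | cons a t ih =>
    intro p sk fuel hs hp ht hpw hfuel
    obtain ⟨k, v⟩ := a
    match fuel with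
    | 0 => exact absurd hfuel (by simp)
    | fuel + 1 =>
      simp only [pvWhileA, hs]
      rw [pvFindNext_append p ((k, v) :: t) sk (fun a ha => not_lt.mpr (hp a ha))]
      have hk : sk < k := ht (k, v) (by simp)
      simp only [pvFindNext, if_pos hk, List.cons.injEq, true_and]
      rw [List.pairwise_cons] at hpw
      refine ih (p ++ [(k, v)]) k fuel (by simp [hs]) ?_ ?_ hpw.2 (by simp at hfuel; omega)
      · intro a ha
        rcases List.mem_append.mp ha with ha | ha
        · exact le_of_lt (lt_of_le_of_lt (hp a ha) hk)
        · simp at ha; simp [ha]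
      · exact hpw.1

-- ===== VERDICT (by name: the statement is the Claim_ definition above) =====
theorem min_key_order_spec : Claim_equal_min_key_order := by
  intro adict _ hpre
  unfold Spec_min_key_order min_key_order min_key_order_alt
  show (match pvSortedItems adict with
        | [] => []
        | (k, v) :: _ => (k, v) :: pvWhileA adict k adict.length) = pvSortedItems adict
  have hpw : (pvSortedItems adict).Pairwise (fun a b => a.1 < b.1) :=
    sorted2_pairwise_keys_lt adict hpre
  have hlen : (pvSortedItems adict).length = adict.length :=
    (PySem.List.sorted2_perm adict Prod.fst Prod.snd false).length_eq
  cases hs : pvSortedItems adict with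
  | nil => rfl
  | cons a rest =>
    obtain ⟨k, v⟩ := a
    rw [hs] at hpw hlen
    rw [List.pairwise_cons] at hpw
    refine congrArg (List.cons (k, v)) ?_
    refine pvWhileA_suffix adict rest [(k, v)] k adict.length (by simp [hs]) ?_ hpw.1 hpw.2 ?_
    · intro a ha; simp at ha; simp [ha]
    · simp at hlen; omega
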